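-- pv_equiv track=rewrite | github.com/wanghw37/spice-fork | spice/event_inference/mcmc_for_large_chroms.py | _select_events_with_same_start_or_end
-- ===== SOURCE A (Python) =====
-- from collections import Counter, namedtuple, defaultdict
--
-- def _select_events_with_same_start_or_end(all_events, start_end):
--     '''Finds all pairs of events that share a start or end'''
--     assert start_end in ['start', 'end']
--     start_end_i = 0 if start_end == 'start' else 1
--     # Group tuples by their second element
--     grouped_by_second = defaultdict(list)
--     for tup in all_events:
--         grouped_by_second[tup[start_end_i]].append(tup)
--     # Filter groups to keep only those with more than one tuple
--     filtered_groups = {k: v for k, v in grouped_by_second.items() if len(v) > 1}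
--     return filtered_groups
-- ===== SOURCE B (Python) =====
-- def _select_events_with_same_start_or_end(all_events, start_end):
--     '''Finds all pairs of events that share a start or end'''
--     assert start_end in ['start', 'end']
--     start_end_i = 0 if start_end == 'start' else 1
--     result = {}
--     remaining = list(all_events)
--     while remaining:
--         k = remaining[0][start_end_i]
--         group = [t for t in remaining if t[start_end_i] == k]
--         if len(group) > 1:
--             result[k] = group
--         remaining = [t for t in remaining if t[start_end_i] != k]
--     return result
-- ===== Notes on version B (the rewrite author's own statement) =====
-- stated objective: alternative
-- what changed: A makes one hash-grouping pass into a defaultdict and then filters the finished dict by group size; B uses no dictionary grouping at all: it repeatedly partitions the remaining event list on the key of its first element (quicksort-style selection), emitting each multi-element partition as it is peeled off.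
import Mathlib
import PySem

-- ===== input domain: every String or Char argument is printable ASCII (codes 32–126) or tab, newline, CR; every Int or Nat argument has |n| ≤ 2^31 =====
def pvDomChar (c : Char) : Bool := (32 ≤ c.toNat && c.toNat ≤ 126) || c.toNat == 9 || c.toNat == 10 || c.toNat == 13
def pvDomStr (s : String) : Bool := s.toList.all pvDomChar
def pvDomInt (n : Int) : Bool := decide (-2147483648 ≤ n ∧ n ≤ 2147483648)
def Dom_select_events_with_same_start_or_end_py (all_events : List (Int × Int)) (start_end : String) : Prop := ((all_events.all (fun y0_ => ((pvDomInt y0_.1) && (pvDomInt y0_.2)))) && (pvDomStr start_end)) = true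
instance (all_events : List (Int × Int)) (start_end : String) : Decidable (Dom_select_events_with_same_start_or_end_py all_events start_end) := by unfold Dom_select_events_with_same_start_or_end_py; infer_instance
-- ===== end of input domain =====

-- B replaces A's hash-grouping-then-filter with a dictionary-free repeated partition of the
-- remaining event list on the key of its first element (objective: alternative, not faster).

-- Shared helper: the Python tuple indexing 'tup[start_end_i]' with start_end_i ∈ {0, 1}.
def pvKey (i : Int) (u : Int × Int) : Int := if i = 0 then u.1 else u.2

-- ===== PORT A =====
-- 'assert start_end in ["start", "end"]' raises AssertionError on other strings: excluded by Pre_.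
-- The dict comprehension '{k: v for k, v in d.items() if len(v) > 1}' keeps the surviving items
-- in their original order (keys are already distinct), so it is ported as List.filter on items.
def select_events_with_same_start_or_end_py (all_events : List (Int × Int)) (start_end : String) : List (Int × List (Int × Int)) :=
  let start_end_i : Int := if start_end = "start" then 0 else 1
  let grouped_by_second : PySem.Dict Int (List (Int × Int)) :=
    all_events.foldl
      (fun d tup => d.modify (pvKey start_end_i tup) [] (fun v => v ++ [tup]))
      PySem.Dict.empty
  grouped_by_second.items.filter (fun kv => kv.2.length > 1)

-- ===== PORT B =====
-- The while loop over 'remaining': each iteration partitions 'remaining' on the key of its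
-- first element, appends the group to 'result' when it has more than one element, and loops
-- on the events with a different key.  Ported as recursion on the shrinking remaining list.
def pvAltGo (start_end_i : Int) : List (Int × Int) → List (Int × List (Int × Int))
  | [] => []
  | t :: rest =>
    let k : Int := pvKey start_end_i t
    let group := (t :: rest).filter (fun u => pvKey start_end_i u == k)
    let remaining' := rest.filter (fun u => !(pvKey start_end_i u == k))
    if group.length > 1 then (k, group) :: pvAltGo start_end_i remaining'
    else pvAltGo start_end_i remaining'
termination_by l => l.length
decreasing_by
  all_goals simpa using Nat.lt_succ_of_le (le_trans (List.length_filter_le _ _) (by simp))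

def select_events_with_same_start_or_end_py_alt (all_events : List (Int × Int)) (start_end : String) : List (Int × List (Int × Int)) :=
  let start_end_i : Int := if start_end = "start" then 0 else 1
  pvAltGo start_end_i all_events

-- ===== PRECONDITION & SPEC =====
-- Pre_ excludes exactly the inputs on which A's assert raises AssertionError.
def Pre_select_events_with_same_start_or_end_py (all_events : List (Int × Int)) (start_end : String) : Prop :=
  start_end = "start" ∨ start_end = "end"
instance (all_events : List (Int × Int)) (start_end : String) : Decidable (Pre_select_events_with_same_start_or_end_py all_events start_end) := by unfold Pre_select_events_with_same_start_or_end_py; infer_instance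

def pvWitness_select_events_with_same_start_or_end_py : (List (Int × Int)) × String :=
  ([(1, 5), (1, 7), (2, 7)], "start")

def Spec_select_events_with_same_start_or_end_py (all_events : List (Int × Int)) (start_end : String) (out : List (Int × List (Int × Int))) : Prop := out = select_events_with_same_start_or_end_py_alt all_events start_end
instance (all_events : List (Int × Int)) (start_end : String) (out : List (Int × List (Int × Int))) : Decidable (Spec_select_events_with_same_start_or_end_py all_events start_end out) := by unfold Spec_select_events_with_same_start_or_end_py; infer_instance

-- ===== CLAIM (what is proved, stated in full; the proofs are below) =====
def Claim_equal_select_events_with_same_start_or_end_py : Prop := ∀ (all_events : List (Int × Int)) (start_end : String), Dom_select_events_with_same_start_or_end_py all_events start_end → Pre_select_events_with_same_start_or_end_py all_events start_end → Spec_select_events_with_same_start_or_end_py all_events start_end (select_events_with_same_start_or_end_py all_events start_end)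

-- ===== LEMMAS AND PROOFS =====

-- Taking the distinct elements (in first-occurrence order) commutes with filtering.
lemma pv_ofList_filter (p : Int → Bool) (l : List Int) :
    PySem.Set.ofList (l.filter p) = (PySem.Set.ofList l).filter p := by
  induction l with
  | nil => rfl
  | cons x xs ih =>
    by_cases hx : p x
    · rw [List.filter_cons_of_pos hx, PySem.Set.ofList_cons, PySem.Set.ofList_cons, ih,
        PySem.Set.discard, PySem.Set.discard, List.filter_cons_of_pos hx,
        List.filter_filter, List.filter_filter]
      congr 1
      apply List.filter_congr
      intro y _
      exact Bool.and_comm _ _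
    · rw [List.filter_cons_of_neg hx, PySem.Set.ofList_cons, ih,
        List.filter_cons_of_neg hx, PySem.Set.discard, List.filter_filter]
      apply List.filter_congr
      intro y _
      by_cases hy : p y
      · have hne : y ≠ x := fun h => hx (h ▸ hy)
        simp [hy]
        exact hne
      · simp [hy]

-- Events with a key other than k survive the removal of the key-k partition.
lemma pv_filter_ne_absorb (i k k' : Int) (h : k' ≠ k) (l : List (Int × Int)) :
    (l.filter (fun u => !(pvKey i u == k))).filter (fun u => pvKey i u == k')
      = l.filter (fun u => pvKey i u == k') := by
  rw [List.filter_filter]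
  apply List.filter_congr
  intro u _
  by_cases hu : pvKey i u = k'
  · simp [hu]
    exact h
  · simp [hu]

-- B's partition recursion computes: the distinct keys in first-occurrence order, each paired
-- with its sublist of events, keeping only the groups with more than one element.
lemma pv_go_eq (i : Int) : ∀ (n : Nat) (xs : List (Int × Int)), xs.length ≤ n →
    pvAltGo i xs
      = ((PySem.Set.ofList (xs.map (pvKey i))).map
          (fun k => (k, xs.filter (fun u => pvKey i u == k)))).filter
          (fun kv => kv.2.length > 1) := by
  intro n
  induction n with
  | zero =>
    intro xs hxs
    have : xs = [] := List.eq_nil_of_length_eq_zero (Nat.le_zero.mp hxs)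
    subst this
    rw [pvAltGo]
    rfl
  | succ n ih =>
    intro xs hxs
    match xs with
    | [] => rw [pvAltGo]; rfl
    | t :: rest =>
      rw [pvAltGo]
      set k := pvKey i t with hk
      set remaining' := rest.filter (fun u => !(pvKey i u == k)) with hrem
      have hlen : remaining'.length ≤ n := by
        rw [hrem]
        have h2 := List.length_filter_le (fun u => !(pvKey i u == k)) rest
        simp only [List.length_cons] at hxs
        omega
      have hmapkeys : remaining'.map (pvKey i) = (rest.map (pvKey i)).filter (fun y => !(y == k)) := by
        rw [hrem, List.filter_map]; rfl
      have htail :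
          ((PySem.Set.ofList (rest.map (pvKey i))).discard k).map
              (fun k' => (k', (t :: rest).filter (fun u => pvKey i u == k')))
            = (PySem.Set.ofList (remaining'.map (pvKey i))).map
              (fun k' => (k', remaining'.filter (fun u => pvKey i u == k'))) := by
        rw [hmapkeys, pv_ofList_filter, PySem.Set.discard]
        apply List.map_congr_left
        intro k' hk'
        have hne : k' ≠ k := by
          have := List.of_mem_filter hk'
          simpa using this
        have hhead : (pvKey i t == k') = false := by
          simp only [beq_eq_false_iff_ne, ne_eq, ← hk]
          exact fun h => hne h.symm
        rw [List.filter_cons, if_neg (by simp [hhead]), hrem,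
          pv_filter_ne_absorb i k k' hne]
      rw [List.map_cons, PySem.Set.ofList_cons, List.map_cons, ← hk, htail, ih remaining' hlen,
        List.filter_cons]
      have hkk : (pvKey i t == k) = true := by simp [hk]
      by_cases hg : (t :: rest.filter (fun u => pvKey i u == k)).length > 1
      · rw [if_pos hkk, if_pos hg, List.filter_cons, if_pos (by simpa using hg)]
      · rw [if_pos hkk, if_neg hg, List.filter_cons, if_neg (by simpa using hg)]

-- The group A stores at k is exactly the key-k sublist of all_events.
lemma pv_group_getD (i : Int) (xs : List (Int × Int)) (k : Int) :
    (xs.foldl (fun d tup => d.modify (pvKey i tup) [] (fun v => v ++ [tup]))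
        PySem.Dict.empty).getD k []
      = xs.filter (fun tup => pvKey i tup == k) := by
  have hf : (xs.map (fun tup => ((pvKey i tup : Int), tup))).foldl
      (fun d q => d.modify q.1 [] (fun v => v ++ [q.2])) PySem.Dict.empty
      = xs.foldl (fun d tup => d.modify (pvKey i tup) [] (fun v => v ++ [tup])) PySem.Dict.empty := by
    simp only [List.foldl_map]
  rw [← hf, PySem.Dict.getD_foldl_modify_append]
  simp [List.filter_map, Function.comp_def]

-- A's grouped dict, as a list of items: the same characterisation B's recursion reaches.
lemma pv_a_items (i : Int) (xs : List (Int × Int)) :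
    (xs.foldl (fun d tup => d.modify (pvKey i tup) [] (fun v => v ++ [tup]))
        PySem.Dict.empty).items
      = (PySem.Set.ofList (xs.map (pvKey i))).map
          (fun k => (k, xs.filter (fun u => pvKey i u == k))) := by
  set d := xs.foldl (fun d tup => d.modify (pvKey i tup) [] (fun v => v ++ [tup]))
    PySem.Dict.empty with hd
  have hnd : d.keys.Nodup := by
    apply PySem.Dict.nodup_keys_foldl_modify_key
    simp
  have hkeys : d.keys = PySem.Set.ofList (xs.map (pvKey i)) := by
    rw [hd, PySem.Dict.keys_foldl_modify_key xs (pvKey i) []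
      (fun _ tup v => v ++ [tup]) PySem.Dict.empty]
    exact PySem.Set.update_nil_left _
  rw [PySem.Dict.items_eq_map_keys d hnd [], hkeys]
  apply List.map_congr_left
  intro k _
  rw [hd, pv_group_getD]

theorem pv_main (all_events : List (Int × Int)) (start_end : String) :
    select_events_with_same_start_or_end_py all_events start_end
      = select_events_with_same_start_or_end_py_alt all_events start_end := by
  simp only [select_events_with_same_start_or_end_py, select_events_with_same_start_or_end_py_alt]
  rw [pv_go_eq _ all_events.length all_events le_rfl, pv_a_items]

-- ===== VERDICT (by name: the statement is the Claim_ definition above) =====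
theorem select_events_with_same_start_or_end_py_spec : Claim_equal_select_events_with_same_start_or_end_py := by
  intro all_events start_end _ _
  unfold Spec_select_events_with_same_start_or_end_py
  exact pv_main all_events start_end
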